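-- pv_equiv track=rewrite | github.com/17764591637/jianzhi_offer | 剑指offer/10_rectCover.py | rectCover
-- ===== SOURCE A (Python) =====
-- def rectCover(number):
--     # write code here
--     r = [1,2]
--     if number == 0:
--         return 0
--     elif number == 1:
--         return 1
--     elif number == 2:
--         return 2
--     else:
--         for i in range(number-2):
--             res = r[-1]+r[-2]
--             r.append(res)
--
--         return res
-- ===== SOURCE B (Python) =====
-- def rectCover(number):
--     # Fast-doubling Fibonacci: rectCover(n) = F(n+1) for n >= 1, and 0 for n == 0.
--     if number == 0:
--         return 0
--     def fd(n):
--         # returns (F(n), F(n+1))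
--         if n == 0:
--             return (0, 1)
--         a, b = fd(n >> 1)
--         c = a * (2 * b - a)
--         d = a * a + b * b
--         if n & 1:
--             return (d, c + d)
--         else:
--             return (c, d)
--     return fd(number + 1)[0]
-- ===== Notes on version B (the rewrite author's own statement) =====
-- stated objective: faster
-- what changed: Replaced the linear list-appending Fibonacci loop by recursive fast-doubling (O(log n) arithmetic steps, no list).
import Mathlib
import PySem

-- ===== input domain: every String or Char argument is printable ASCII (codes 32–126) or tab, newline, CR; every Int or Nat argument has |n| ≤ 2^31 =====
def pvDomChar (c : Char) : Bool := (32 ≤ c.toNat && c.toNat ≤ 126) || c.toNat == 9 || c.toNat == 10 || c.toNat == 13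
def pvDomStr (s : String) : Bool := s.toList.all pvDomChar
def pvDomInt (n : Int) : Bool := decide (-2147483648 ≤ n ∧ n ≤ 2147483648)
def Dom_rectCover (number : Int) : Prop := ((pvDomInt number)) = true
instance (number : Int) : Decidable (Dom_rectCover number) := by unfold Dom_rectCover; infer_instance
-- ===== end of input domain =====

-- B replaces A's linear list-appending Fibonacci loop by fast-doubling recursion (asymptotically faster).


-- ===== PORT A =====
-- one loop iteration: res = r[-1] + r[-2]; r.append(res); state (r, res)
def rectCoverStep (st : List Int × Int) : List Int × Int :=
  let res := (PySem.List.pyGet? st.1 (-1)).getD 0 + (PySem.List.pyGet? st.1 (-2)).getD 0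
  (st.1 ++ [res], res)

def rectCover (number : Int) : Int :=
  if number = 0 then 0
  else if number = 1 then 1
  else if number = 2 then 2
  else
    ((List.range (number - 2).toNat).foldl (fun st _ => rectCoverStep st) ([1, 2], 0)).2

-- ===== PORT B =====
-- fast doubling: fd n = (F(n), F(n+1)); Python's n >> 1 is n / 2, n & 1 is n % 2, on the nonnegative arguments reached
def fd : Nat → Int × Int
  | 0 => (0, 1)
  | (n + 1) =>
    let p := fd ((n + 1) / 2)
    let a := p.1
    let b := p.2
    let c := a * (2 * b - a)
    let d := a * a + b * b
    if (n + 1) % 2 = 1 then (d, c + d) else (c, d)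
decreasing_by omega

def rectCover_alt (number : Int) : Int :=
  if number = 0 then 0
  else (fd (number + 1).toNat).1

-- ===== PRECONDITION & SPEC =====
-- A raises UnboundLocalError for number < 0 (the loop never runs, 'res' is unbound); Pre_ excludes negatives.
def Pre_rectCover (number : Int) : Prop := 0 ≤ number
instance (number : Int) : Decidable (Pre_rectCover number) := by unfold Pre_rectCover; infer_instance
def pvWitness_rectCover : Int := 5
def Spec_rectCover (number : Int) (out : Int) : Prop := out = rectCover_alt number
instance (number : Int) (out : Int) : Decidable (Spec_rectCover number out) := by unfold Spec_rectCover; infer_instance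

-- ===== CLAIM (what is proved, stated in full; the proofs are below) =====
def Claim_equal_rectCover : Prop := ∀ (number : Int), Dom_rectCover number → Pre_rectCover number → Spec_rectCover number (rectCover number)

-- ===== LEMMAS AND PROOFS =====

-- reference value: g k = fib (k + 2) as an Int
def gfib (k : Nat) : Int := (Nat.fib (k + 2) : Int)

theorem gfib_rec (k : Nat) : gfib (k + 2) = gfib (k + 1) + gfib k := by
  simp [gfib, Nat.fib_add_two]
  ring

-- the list A carries is exactly the fib values seen so far
theorem listG_succ (k : Nat) :
    (List.range (k + 1)).map gfib = (List.range k).map gfib ++ [gfib k] := by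
  simp [List.range_succ]

theorem pyGet_last (k : Nat) :
    (PySem.List.pyGet? ((List.range (k + 3)).map gfib) (-1)).getD 0 = gfib (k + 2) := by
  simp [PySem.List.pyGet?, PySem.List.pyIdx?]

theorem pyGet_last2 (k : Nat) :
    (PySem.List.pyGet? ((List.range (k + 3)).map gfib) (-2)).getD 0 = gfib (k + 1) := by
  simp [PySem.List.pyGet?, PySem.List.pyIdx?]

theorem loop_inv (m : Nat) :
    (List.range (m + 1)).foldl (fun st _ => rectCoverStep st) ([1, 2], 0)
      = ((List.range (m + 3)).map gfib, gfib (m + 2)) := by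
  induction m with
  | zero =>
    decide
  | succ k ih =>
    rw [List.range_succ, List.foldl_append, ih]
    show rectCoverStep _ = _
    simp only [rectCoverStep, pyGet_last, pyGet_last2]
    rw [← gfib_rec]
    have e : k + 1 + 3 = (k + 3) + 1 := rfl
    rw [e, listG_succ (k + 3)]

-- the two doubling identities, cast to Int
theorem fibI_two_mul (q : Nat) :
    (Nat.fib (2 * q) : Int) = (Nat.fib q : Int) * (2 * (Nat.fib (q + 1) : Int) - (Nat.fib q : Int)) := by
  have hle : Nat.fib q ≤ 2 * Nat.fib (q + 1) :=
    le_trans Nat.fib_le_fib_succ (by omega)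
  rw [Nat.fib_two_mul, Nat.cast_mul, Nat.cast_sub hle]
  push_cast
  ring

theorem fibI_two_mul_add_one (q : Nat) :
    (Nat.fib (2 * q + 1) : Int) =
      (Nat.fib q : Int) * (Nat.fib q : Int) + (Nat.fib (q + 1) : Int) * (Nat.fib (q + 1) : Int) := by
  rw [Nat.fib_two_mul_add_one]
  push_cast
  ring

theorem fd_eq (n : Nat) : fd n = ((Nat.fib n : Int), (Nat.fib (n + 1) : Int)) := by
  induction n using Nat.strong_induction_on with
  | _ n ih =>
    match n with
    | 0 => simp [fd]
    | (m + 1) =>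
      rw [fd, ih ((m + 1) / 2) (by omega)]
      simp only
      by_cases hpar : (m + 1) % 2 = 1
      · -- odd: m + 1 = 2q + 1
        rw [if_pos hpar]
        obtain ⟨q, hq1, hq2⟩ : ∃ q, (m + 1) / 2 = q ∧ m + 1 = 2 * q + 1 :=
          ⟨(m + 1) / 2, rfl, by omega⟩
        rw [hq1, hq2]
        have e2 : 2 * q + 1 + 1 = 2 * q + 2 := by omega
        rw [e2, Nat.fib_add_two]
        simp only [Prod.mk.injEq]
        refine ⟨by rw [fibI_two_mul_add_one], ?_⟩
        push_cast
        rw [fibI_two_mul, fibI_two_mul_add_one]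
      · -- even: m + 1 = 2q
        rw [if_neg hpar]
        obtain ⟨q, hq1, hq2⟩ : ∃ q, (m + 1) / 2 = q ∧ m + 1 = 2 * q :=
          ⟨(m + 1) / 2, rfl, by omega⟩
        rw [hq1, hq2]
        simp only [Prod.mk.injEq]
        exact ⟨(fibI_two_mul q).symm, (fibI_two_mul_add_one q).symm⟩

theorem alt_fib (number : Int) (_h : 0 ≤ number) :
    rectCover_alt number = if number = 0 then 0 else (Nat.fib (number + 1).toNat : Int) := by
  unfold rectCover_alt
  split_ifs with h0
  · rfl
  · rw [fd_eq]

-- ===== VERDICT (by name: the statement is the Claim_ definition above) =====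
theorem rectCover_spec : Claim_equal_rectCover := by
  intro number _ hpre
  have hp : 0 ≤ number := hpre
  unfold Spec_rectCover
  rw [alt_fib number hp]
  unfold rectCover
  split_ifs with h0 h1 h2
  · rfl
  · subst h1; decide
  · subst h2; decide
  · -- number ≥ 3
    have h3 : 3 ≤ number := by omega
    obtain ⟨m, hm1, hm2⟩ :
        ∃ m : Nat, (number - 2).toNat = m + 1 ∧ (number + 1).toNat = m + 4 :=
      ⟨(number - 3).toNat, by omega, by omega⟩
    rw [hm1, hm2, loop_inv]
    simp [gfib]
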